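-- pv_equiv track=rewrite | github.com/PythonWoods/structum | structum_tree/src/structum_tree/plugin.py | parse_list_callback
-- ===== SOURCE A (Python) =====
-- def parse_list_callback(value: list[str] | None) -> list[str] | None:
--     """Parse comma-separated values and flatten multiple flags.
--
--     Supports both:
--     - Multiple flags: --ext py --ext md
--     - Comma-separated: --ext py,md,js
--     - Mixed: --ext py,md --ext js
--     """
--     if not value:
--         return None
--
--     result = []
--     for item in value:
--         # Split by comma and strip whitespace
--         parts = [part.strip() for part in item.split(",") if part.strip()]
--         result.extend(parts)
--
--     return result if result else None
-- ===== SOURCE B (Python) =====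
-- def _token(buf):
--     """Trim whitespace off a raw token (list of chars); return the string, or None if nothing is left."""
--     while buf and buf[0].isspace():
--         buf = buf[1:]
--     while buf and buf[-1].isspace():
--         buf = buf[:-1]
--     return "".join(buf) if buf else None
--
--
-- def parse_list_callback(value):
--     """Character-level tokenizer: scan each flag once, cutting tokens at commas."""
--     if not value:
--         return None
--     out = []
--     for item in value:
--         buf = []
--         for ch in item:
--             if ch == ",":
--                 t = _token(buf)
--                 if t is not None:
--                     out.append(t)
--                 buf = []
--             else:
--                 buf.append(ch)
--         t = _token(buf)
--         if t is not None:
--             out.append(t)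
--     return out if out else None
-- ===== Notes on version B (the rewrite author's own statement) =====
-- stated objective: alternative
-- what changed: Replaces A's split(',')/strip/filter comprehension per flag by a single character-level scan (state machine with a token buffer flushed at commas, whitespace trimmed off each buffer), so no intermediate list of split substrings is built.
import Mathlib
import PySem

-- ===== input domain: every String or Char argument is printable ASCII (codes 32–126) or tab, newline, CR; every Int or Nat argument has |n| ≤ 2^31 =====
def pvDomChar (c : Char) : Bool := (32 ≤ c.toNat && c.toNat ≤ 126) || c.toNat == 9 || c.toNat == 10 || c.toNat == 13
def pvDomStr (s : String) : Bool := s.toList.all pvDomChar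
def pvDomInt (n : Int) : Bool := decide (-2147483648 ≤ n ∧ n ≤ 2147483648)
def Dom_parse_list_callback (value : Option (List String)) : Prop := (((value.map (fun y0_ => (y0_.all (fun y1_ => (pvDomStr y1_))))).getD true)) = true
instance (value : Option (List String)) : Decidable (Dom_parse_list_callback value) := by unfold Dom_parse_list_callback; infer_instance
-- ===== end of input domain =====

-- B replaces A's per-flag split(",")/strip/filter comprehension by a character-level state machine
-- (one scan per flag, a token buffer flushed at commas, whitespace trimmed off each buffer).

-- ===== PORT A =====
-- item.split(",")  (sep nonempty, so split? is always `some`)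
def pvSplitComma (s : String) : List String := (PySem.Str.split? s ",").getD []

def parse_list_callback (value : Option (List String)) : Option (List String) :=
  match value with
  | none => none
  | some v =>
    if v = [] then none
    else
      let result := v.foldl (fun result item =>
        result ++ ((pvSplitComma item).filter (fun part => !(PySem.Str.strip part == ""))).map (fun part => PySem.Str.strip part)) []
      if result = [] then none else some result

-- ===== PORT B =====
-- `while buf and buf[0].isspace(): buf = buf[1:]`
def tokTrimL : List Char → List Char
  | [] => []
  | c :: r => if PySem.Chars.isspace c then tokTrimL r else c :: r

-- `while buf and buf[-1].isspace(): buf = buf[:-1]`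
def tokTrimR (l : List Char) : List Char :=
  if _h : (l.getLast?.map PySem.Chars.isspace).getD false = true then tokTrimR l.dropLast else l
termination_by l.length
decreasing_by
  cases l with
  | nil => simp at _h
  | cons a r => simp [List.length_dropLast]

-- `_token(buf)`: trim, then the string or None
def token? (buf : List Char) : Option String :=
  let b := tokTrimR (tokTrimL buf)
  if b = [] then none else some (String.ofList b)

-- the inner character loop's step: state = (current buffer, output so far)
def scanStep (st : List Char × List String) (ch : Char) : List Char × List String :=
  if ch = ',' then ([], st.2 ++ (token? st.1).toList) else (st.1 ++ [ch], st.2)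

-- one flag: scan its characters, then flush the final buffer
def scanItem (out : List String) (item : String) : List String :=
  (item.toList.foldl scanStep (([] : List Char), out)).2
    ++ (token? (item.toList.foldl scanStep (([] : List Char), out)).1).toList

def parse_list_callback_alt (value : Option (List String)) : Option (List String) :=
  match value with
  | none => none
  | some v =>
    if v = [] then none
    else
      let out := v.foldl scanItem []
      if out = [] then none else some out

-- ===== PRECONDITION & SPEC =====
def Spec_parse_list_callback (value : Option (List String)) (out : Option (List String)) : Prop := out = parse_list_callback_alt value
instance (value : Option (List String)) (out : Option (List String)) : Decidable (Spec_parse_list_callback value out) := by unfold Spec_parse_list_callback; infer_instance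

-- ===== CLAIM (what is proved, stated in full; the proofs are below) =====
def Claim_equal_parse_list_callback : Prop := ∀ (value : Option (List String)), Dom_parse_list_callback value → Spec_parse_list_callback value (parse_list_callback value)

-- ===== LEMMAS AND PROOFS =====

-- simple single-character comma splitter used to characterise PySem.Chars.splitOn · [',']
def splitC : List Char → List (List Char)
  | [] => [[]]
  | c :: rest => if c = ',' then [] :: splitC rest else (splitC rest).modifyHead (c :: ·)

theorem splitC_ne_nil (l : List Char) : splitC l ≠ [] := by
  cases l with
  | nil => simp [splitC]
  | cons c rest =>
    simp only [splitC]
    split_ifs <;> simp [List.modifyHead]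
    cases h : splitC rest with
    | nil => exact absurd h (splitC_ne_nil rest)
    | cons a as => simp

theorem go_eq (l : List Char) : ∀ (fuel : Nat) (cur : List Char) (acc : List (List Char)),
    l.length < fuel →
    PySem.Chars.splitOn.go [','] fuel l cur acc
      = acc.reverse ++ (splitC l).modifyHead (cur.reverse ++ ·) := by
  induction l with
  | nil =>
    intro fuel cur acc h
    cases fuel with
    | zero => omega
    | succ f => simp [PySem.Chars.splitOn.go, splitC]
  | cons c rest ih =>
    intro fuel cur acc h
    cases fuel with
    | zero => omega
    | succ f =>
      obtain ⟨hd, tl, hsp⟩ : ∃ hd tl, splitC rest = hd :: tl := by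
        cases hx : splitC rest with
        | nil => exact absurd hx (splitC_ne_nil rest)
        | cons a as => exact ⟨a, as, rfl⟩
      by_cases hc : c = ','
      · subst hc
        rw [PySem.Chars.splitOn.go]
        simp only [List.isPrefixOf, List.length_cons] at *
        rw [if_pos (by simp)]
        simp only [List.length_nil, List.drop_succ_cons, List.drop_zero]
        rw [ih f [] (List.reverse cur :: acc) (by simp at h; omega)]
        simp [splitC, hsp]
      · rw [PySem.Chars.splitOn.go]
        rw [if_neg (by simp [List.isPrefixOf]; exact fun h' => hc h'.symm)]
        rw [ih f (c :: cur) acc (by simp at h ⊢; omega)]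
        simp [splitC, hc, hsp]

theorem splitOn_eq_splitC (l : List Char) : PySem.Chars.splitOn l [','] = splitC l := by
  unfold PySem.Chars.splitOn
  rw [go_eq l (l.length + 1) [] [] (by omega)]
  obtain ⟨hd, tl, hsp⟩ : ∃ hd tl, splitC l = hd :: tl := by
    cases hx : splitC l with
    | nil => exact absurd hx (splitC_ne_nil l)
    | cons a as => exact ⟨a, as, rfl⟩
  simp [hsp]

theorem tokTrimL_eq (l : List Char) : tokTrimL l = PySem.Chars.lstrip l := by
  induction l with
  | nil => rfl
  | cons c r ih =>
    simp only [tokTrimL, PySem.Chars.lstrip, List.dropWhile_cons]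
    split_ifs with h
    · exact ih
    · rfl

theorem tokTrimR_eq (l : List Char) : tokTrimR l = PySem.Chars.rstrip l := by
  induction l using List.reverseRecOn with
  | nil => simp [tokTrimR, PySem.Chars.rstrip]
  | append_singleton r c ih =>
    rw [tokTrimR]
    simp only [List.getLast?_concat, Option.map_some, Option.getD_some]
    by_cases h : PySem.Chars.isspace c
    · rw [dif_pos h, List.dropLast_concat, ih]
      simp [PySem.Chars.rstrip, h]
    · rw [dif_neg (by simp [h])]
      simp [PySem.Chars.rstrip, h]

theorem token?_eq (s : List Char) :
    token? s = if !(PySem.Str.strip (String.ofList s) == "") then some (PySem.Str.strip (String.ofList s)) else none := by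
  have hs : PySem.Str.strip (String.ofList s) = String.ofList (PySem.Chars.strip s) := by
    simp [PySem.Str.strip]
  rw [hs]
  unfold token?
  rw [tokTrimL_eq, tokTrimR_eq]
  have hts : PySem.Chars.rstrip (PySem.Chars.lstrip s) = PySem.Chars.strip s := rfl
  rw [hts]
  by_cases h : PySem.Chars.strip s = []
  · simp [h]
  · have hne : (String.ofList (PySem.Chars.strip s) == "") = false := by
      apply beq_false_of_ne
      intro hcon
      exact h (by simpa using congrArg String.toList hcon)
    simp [h, hne]

-- flush the segments of one flag: exactly what A's comprehension produces
def flushSegs (segs : List (List Char)) : List String :=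
  segs.flatMap (fun s => (token? s).toList)

theorem modifyHead_nil_append (segs : List (List Char)) (h : segs ≠ []) :
    segs.modifyHead (([] : List Char) ++ ·) = segs := by
  cases segs with
  | nil => exact absurd rfl h
  | cons a as => simp

theorem scan_eq (l : List Char) : ∀ (buf : List Char) (out : List String),
    (l.foldl scanStep (buf, out)).2 ++ (token? (l.foldl scanStep (buf, out)).1).toList
      = out ++ flushSegs ((splitC l).modifyHead (buf ++ ·)) := by
  induction l with
  | nil => intro buf out; simp [splitC, flushSegs]
  | cons c rest ih =>
    intro buf out
    obtain ⟨hd, tl, hsp⟩ : ∃ hd tl, splitC rest = hd :: tl := by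
      cases hx : splitC rest with
      | nil => exact absurd hx (splitC_ne_nil rest)
      | cons a as => exact ⟨a, as, rfl⟩
    by_cases hc : c = ','
    · subst hc
      have hstep : scanStep (buf, out) ',' = ([], out ++ (token? buf).toList) := by
        simp [scanStep]
      rw [List.foldl_cons, hstep, ih [] (out ++ (token? buf).toList)]
      simp [splitC, hsp, flushSegs]
    · have hstep : scanStep (buf, out) c = (buf ++ [c], out) := by
        simp [scanStep, hc]
      rw [List.foldl_cons, hstep, ih (buf ++ [c]) out]
      simp [splitC, hc, hsp, flushSegs]

theorem flushSegs_eq_filterMap (segs : List (List Char)) :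
    flushSegs segs
      = ((segs.map String.ofList).filter (fun part => !(PySem.Str.strip part == ""))).map (fun part => PySem.Str.strip part) := by
  induction segs with
  | nil => rfl
  | cons s rest ih =>
    simp only [flushSegs, List.flatMap_cons, List.map_cons, List.filter_cons] at *
    rw [token?_eq s]
    by_cases h : (PySem.Str.strip (String.ofList s) == "") = true
    · simp [h, ih]
    · simp only [Bool.not_eq_true] at h
      simp [h, ih]

theorem scanItem_eq (out : List String) (item : String) :
    scanItem out item
      = out ++ ((pvSplitComma item).filter (fun part => !(PySem.Str.strip part == ""))).map (fun part => PySem.Str.strip part) := by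
  unfold scanItem
  rw [scan_eq item.toList [] out, modifyHead_nil_append _ (splitC_ne_nil _), flushSegs_eq_filterMap]
  have hsp : pvSplitComma item = (splitC item.toList).map String.ofList := by
    have hsep : ("," : String).toList = [','] := rfl
    simp [pvSplitComma, PySem.Str.split?, PySem.Chars.split?, hsep, splitOn_eq_splitC]
  rw [hsp]

theorem foldl_scanItem (v : List String) : ∀ (acc : List String),
    v.foldl scanItem acc
      = v.foldl (fun result item =>
          result ++ ((pvSplitComma item).filter (fun part => !(PySem.Str.strip part == ""))).map (fun part => PySem.Str.strip part)) acc := by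
  induction v with
  | nil => intro acc; rfl
  | cons x rest ih =>
    intro acc
    rw [List.foldl_cons, List.foldl_cons, scanItem_eq, ih]

theorem parse_list_callback_spec : Claim_equal_parse_list_callback := by
  intro value _
  unfold Spec_parse_list_callback parse_list_callback parse_list_callback_alt
  cases value with
  | none => rfl
  | some v =>
    by_cases hv : v = []
    · simp [hv]
    · simp only [if_neg hv]
      rw [foldl_scanItem v []]
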